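-- pv_equiv track=rewrite | github.com/joaovitor140000-max/auto-roulette-bot | strategy.py | current_col_streak
-- ===== SOURCE A (Python) =====
-- def number_to_col(n: int):
--     if n == 0:
--         return None
--     r = n % 3
--     return 3 if r == 0 else r
--
-- def current_col_streak(nums):
--     """
--     streak na coluna do histórico (mais recente primeiro).
--     ignora zeros.
--     """
--     col0 = None
--     streak = 0
--     for n in nums:
--         c = number_to_col(n)
--         if c is None:
--             continue
--         if col0 is None:
--             col0 = c
--             streak = 1
--         elif c == col0:
--             streak += 1
--         else:
--             break
--     return col0, streak
-- ===== SOURCE B (Python) =====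
-- def number_to_col(n: int):
--     if n == 0:
--         return None
--     r = n % 3
--     return 3 if r == 0 else r
--
-- def current_col_streak(nums):
--     # two-phase: filter all columns first, then measure the leading run
--     cols = [c for n in nums if (c := number_to_col(n)) is not None]
--     if not cols:
--         return (None, 0)
--     col0 = cols[0]
--     streak = next((i for i, c in enumerate(cols) if c != col0), len(cols))
--     return (col0, streak)
-- ===== Notes on version B (the rewrite author's own statement) =====
-- stated objective: alternative
-- what changed: Replaces A's single stateful loop (mutable col0/streak with continue and break) by a two-phase pass: filter the history into a column list first, then take cols[0] and find the leading-run length as the first index whose column differs.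
import Mathlib
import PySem

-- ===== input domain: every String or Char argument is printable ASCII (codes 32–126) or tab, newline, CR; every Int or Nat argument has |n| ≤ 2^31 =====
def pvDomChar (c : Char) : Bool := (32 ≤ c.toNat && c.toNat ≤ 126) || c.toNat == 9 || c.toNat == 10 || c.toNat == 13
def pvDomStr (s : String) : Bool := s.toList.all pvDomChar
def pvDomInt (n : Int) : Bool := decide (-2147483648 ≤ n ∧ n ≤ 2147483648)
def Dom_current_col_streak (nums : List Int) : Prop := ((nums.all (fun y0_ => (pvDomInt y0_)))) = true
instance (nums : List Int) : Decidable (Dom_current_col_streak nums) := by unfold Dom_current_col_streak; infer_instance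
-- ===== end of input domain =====

-- B replaces A's stateful loop (continue/break) by filter-then-leading-run; same cost, different shape.

-- ===== PORT A =====
def numberToCol (n : Int) : Option Int :=
  if n = 0 then none
  else
    let r := PySem.Int.mod n 3
    some (if r = 0 then 3 else r)

def csLoopA : List Int → Option Int → Int → Option Int × Int
  | [], col0, streak => (col0, streak)
  | n :: rest, col0, streak =>
    match numberToCol n with
    | none => csLoopA rest col0 streak
    | some c =>
      match col0 with
      | none => csLoopA rest (some c) 1
      | some c0 => if c = c0 then csLoopA rest (some c0) (streak + 1) else (some c0, streak)

def current_col_streak (nums : List Int) : Option Int × Int :=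
  csLoopA nums none 0

-- ===== PORT B =====
-- first index whose column differs from col0, else length (port of the `next(enumerate …)` scan)
def csFirstDiff (c0 : Int) : List Int → Nat
  | [] => 0
  | c :: rest => if c ≠ c0 then 0 else 1 + csFirstDiff c0 rest

def current_col_streak_alt (nums : List Int) : Option Int × Int :=
  let cols := nums.filterMap numberToCol
  match cols with
  | [] => (none, 0)
  | c0 :: _ => (some c0, (csFirstDiff c0 cols : Int))

-- ===== PRECONDITION & SPEC =====
def Spec_current_col_streak (nums : List Int) (out : Option Int × Int) : Prop := out = current_col_streak_alt nums
instance (nums : List Int) (out : Option Int × Int) : Decidable (Spec_current_col_streak nums out) := by unfold Spec_current_col_streak; infer_instance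

-- ===== CLAIM (what is proved, stated in full; the proofs are below) =====
def Claim_equal_current_col_streak : Prop := ∀ (nums : List Int), Dom_current_col_streak nums → Spec_current_col_streak nums (current_col_streak nums)

-- ===== LEMMAS AND PROOFS =====
theorem csLoopA_some (xs : List Int) (c0 : Int) (s : Int) :
    csLoopA xs (some c0) s = (some c0, s + (csFirstDiff c0 (xs.filterMap numberToCol) : Int)) := by
  induction xs generalizing s with
  | nil => simp [csLoopA, csFirstDiff]
  | cons n rest ih =>
    cases h : numberToCol n with
    | none => simp [csLoopA, h, ih]
    | some c =>
      by_cases hc : c = c0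
      · subst hc
        simp [csLoopA, h, ih, csFirstDiff]
        ring
      · simp [csLoopA, h, hc, csFirstDiff]

theorem csLoopA_none (xs : List Int) :
    csLoopA xs none 0 = current_col_streak_alt xs := by
  induction xs with
  | nil => simp [csLoopA, current_col_streak_alt]
  | cons n rest ih =>
    cases h : numberToCol n with
    | none => simp [csLoopA, h, ih, current_col_streak_alt]
    | some c =>
      simp [csLoopA, h, current_col_streak_alt, csLoopA_some, csFirstDiff]

-- ===== VERDICT (by name: the statement is the Claim_ definition above) =====
theorem current_col_streak_spec : Claim_equal_current_col_streak := by
  intro nums _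
  unfold Spec_current_col_streak current_col_streak
  exact csLoopA_none nums
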